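-- pv_equiv track=rewrite | github.com/axekar/Demodigi | demodigi.py | _shop_docstring
-- ===== SOURCE A (Python) =====
-- def _shop_docstring(docstring):
--    """
--    Takes a string of documentation and inserts line breaks ensuring each
--    line is max 72 characters wide.
--    """
--    line_maxlen = 72
--    full_string = ""
--    row = ""
--    word = ""
--    for character in docstring:
--       if character == " ":
--          if len(row) + len(word) + 1 >= line_maxlen:
--             full_string += row + "\n"
--             row = word
--          else:
--             row += " " + word
--          word = ""
--       else:
--          word += character
--    full_string += row + " " + word
--    return full_string[1:]
-- ===== SOURCE B (Python) =====
-- def _shop_docstring(docstring):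
--     words = docstring.split(" ")
--     lines = []
--     row = ""
--     for w in words[:-1]:
--         if len(row) + len(w) + 1 >= 72:
--             lines.append(row)
--             row = w
--         else:
--             row += " " + w
--     lines.append(row + " " + words[-1])
--     return "\n".join(lines)[1:]
-- ===== Notes on version B (the rewrite author's own statement) =====
-- stated objective: simpler
-- what changed: B replaces A's character-by-character scan with its row/word/character state by a single pass over the word list from splitting on single spaces, collecting completed lines in a list joined with newlines once at the end; building lines via list append + one join instead of repeated string concatenation is also measurably faster.
import Mathlib
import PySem

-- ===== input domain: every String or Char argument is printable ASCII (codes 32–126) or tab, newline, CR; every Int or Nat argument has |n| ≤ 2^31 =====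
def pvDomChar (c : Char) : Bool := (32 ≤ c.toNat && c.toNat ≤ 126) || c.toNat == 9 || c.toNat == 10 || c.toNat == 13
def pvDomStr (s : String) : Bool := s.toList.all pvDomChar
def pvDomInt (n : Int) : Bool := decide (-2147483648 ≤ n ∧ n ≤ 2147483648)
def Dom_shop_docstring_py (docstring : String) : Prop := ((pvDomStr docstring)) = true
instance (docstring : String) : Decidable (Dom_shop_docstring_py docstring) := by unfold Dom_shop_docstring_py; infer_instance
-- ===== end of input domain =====

-- B replaces A's character-by-character scan by one pass over docstring.split(" "),
-- collecting completed lines in a list joined once at the end (simpler decomposition; measured faster).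

-- ===== PORT A =====
-- state (full_string, row, word), each a List Char; one step of A's for-loop over characters
def pvAStep (st : List Char × List Char × List Char) (c : Char) :
    List Char × List Char × List Char :=
  let (full, row, word) := st
  if c = ' ' then
    if (row.length : Int) + (word.length : Int) + 1 ≥ 72 then
      (full ++ row ++ ['\n'], word, [])
    else
      (full, row ++ ' ' :: word, [])
  else
    (full, row, word ++ [c])

def shop_docstring_py (docstring : String) : String :=
  let st := docstring.toList.foldl pvAStep ([], [], [])
  let full := st.1 ++ st.2.1 ++ ' ' :: st.2.2      -- full_string += row + " " + word
  String.ofList (PySem.List.slice full (some 1) none)  -- full_string[1:]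

-- ===== PORT B =====
-- state (lines, row); one step of B's for-loop over words[:-1]
def pvBStep (st : List (List Char) × List Char) (w : List Char) :
    List (List Char) × List Char :=
  let (lines, row) := st
  if (row.length : Int) + (w.length : Int) + 1 ≥ 72 then
    (lines ++ [row], w)
  else
    (lines, row ++ ' ' :: w)

def shop_docstring_py_alt (docstring : String) : String :=
  let words := PySem.Chars.splitOn docstring.toList [' ']   -- docstring.split(" ")
  let st := (PySem.List.slice words none (some (-1))).foldl pvBStep ([], [])  -- for w in words[:-1]
  let lines := st.1 ++ [st.2 ++ ' ' :: PySem.List.pyGetD words (-1) []]  -- lines.append(row + " " + words[-1])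
  String.ofList ((PySem.Chars.join ['\n'] lines).drop 1)    -- "\n".join(lines)[1:]

-- ===== PRECONDITION & SPEC =====
def Spec_shop_docstring_py (docstring : String) (out : String) : Prop := out = shop_docstring_py_alt docstring
instance (docstring : String) (out : String) : Decidable (Spec_shop_docstring_py docstring out) := by unfold Spec_shop_docstring_py; infer_instance

-- ===== CLAIM (what is proved, stated in full; the proofs are below) =====
def Claim_equal_shop_docstring_py : Prop := ∀ (docstring : String), Dom_shop_docstring_py docstring → Spec_shop_docstring_py docstring (shop_docstring_py docstring)

-- ===== LEMMAS AND PROOFS =====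

-- simple recursive description of splitting a char list on a single space
def pvTokens : List Char → List (List Char)
  | [] => [[]]
  | c :: cs =>
      if c = ' ' then [] :: pvTokens cs
      else
        match pvTokens cs with
        | [] => [[c]]          -- unreachable: pvTokens never returns []
        | t :: ts => (c :: t) :: ts

theorem pvTokens_ne_nil (cs : List Char) : pvTokens cs ≠ [] := by
  cases cs with
  | nil => simp [pvTokens]
  | cons c cs =>
      simp only [pvTokens]
      split
      · simp
      · split <;> simp

-- splitOn.go on a single-space separator, with enough fuel, computes pvTokens
theorem pv_go_space (fuel : Nat) (l : List Char) (h : l.length ≤ fuel)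
    (cur : List Char) (acc : List (List Char)) :
    PySem.Chars.splitOn.go [' '] fuel l cur acc =
      acc.reverse ++
        (match pvTokens l with
         | [] => []
         | t :: ts => (cur.reverse ++ t) :: ts) := by
  induction fuel generalizing l cur acc with
  | zero =>
      have : l = [] := List.length_eq_zero_iff.mp (Nat.le_zero.mp h)
      subst this
      simp [PySem.Chars.splitOn.go, pvTokens]
  | succ fuel ih =>
      cases l with
      | nil => simp [PySem.Chars.splitOn.go, pvTokens]
      | cons c rest =>
          simp only [PySem.Chars.splitOn.go]
          by_cases hc : c = ' '
          · subst hc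
            have hpre : List.isPrefixOf [' '] (' ' :: rest) = true := by
              simp [List.isPrefixOf]
            rw [if_pos hpre]
            have hlen : rest.length ≤ fuel := by simpa using h
            simp only [List.length_cons, List.length_nil, List.drop_succ_cons, List.drop_zero]
            rw [ih rest hlen]
            simp only [pvTokens]
            cases htr : pvTokens rest with
            | nil => exact absurd htr (pvTokens_ne_nil rest)
            | cons t ts => simp
          · have hpre : List.isPrefixOf [' '] (c :: rest) = false := by
              simp [List.isPrefixOf]
              exact fun h => hc h.symm
            rw [if_neg (by simp [hpre])]
            have hlen : rest.length ≤ fuel := by simpa using h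
            rw [ih rest hlen]
            simp only [pvTokens, if_neg hc]
            cases htr : pvTokens rest with
            | nil => exact absurd htr (pvTokens_ne_nil rest)
            | cons t ts => simp

theorem pv_splitOn_space (cs : List Char) :
    PySem.Chars.splitOn cs [' '] = pvTokens cs := by
  unfold PySem.Chars.splitOn
  rw [pv_go_space (cs.length + 1) cs (by omega) [] []]
  cases h : pvTokens cs with
  | nil => exact absurd h (pvTokens_ne_nil cs)
  | cons t ts => simp

-- word-level restatement of A's loop: full_string kept flat, fed whole words
def pvF : List Char × List Char → List (List Char) → List Char × List Char
  | st, [] => st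
  | (full, row), w :: ws =>
      if (row.length : Int) + (w.length : Int) + 1 ≥ 72 then
        pvF (full ++ row ++ ['\n'], w) ws
      else
        pvF (full, row ++ ' ' :: w) ws

-- prepend w to the first token
def pvModHead (w : List Char) : List (List Char) → List (List Char)
  | [] => [w]
  | t :: ts => (w ++ t) :: ts

-- A's character loop equals the word-level loop pvF over the tokens (all but the last),
-- with the last token left as the final `word`
-- last element, [] for the empty list (pvModHead output is never empty)
def pvLast : List (List Char) → List Char
  | [] => []
  | [t] => t
  | _ :: t :: ts => pvLast (t :: ts)

theorem pvLast_cons_cons (a b : List Char) (ts : List (List Char)) :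
    pvLast (a :: b :: ts) = pvLast (b :: ts) := rfl

theorem pv_Aloop_eq (cs : List Char) :
    ∀ (full row word : List Char),
      cs.foldl pvAStep (full, row, word) =
        (let all := pvModHead word (pvTokens cs)
         let st := pvF (full, row) all.dropLast
         (st.1, st.2, pvLast all)) := by
  induction cs with
  | nil => intro full row word; simp [pvTokens, pvModHead, pvF, pvLast]
  | cons c rest ih =>
      intro full row word
      simp only [List.foldl_cons]
      by_cases hc : c = ' '
      · subst hc
        simp only [pvAStep]
        rw [if_pos trivial]
        by_cases hlen : (row.length : Int) + (word.length : Int) + 1 ≥ 72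
        · rw [if_pos hlen, ih (full ++ row ++ ['\n']) word []]
          cases htr : pvTokens rest with
          | nil => exact absurd htr (pvTokens_ne_nil rest)
          | cons t ts =>
              simp [pvTokens, htr, pvModHead, pvF, hlen, pvLast_cons_cons,
                List.dropLast_cons₂]
        · rw [if_neg hlen, ih full (row ++ ' ' :: word) []]
          cases htr : pvTokens rest with
          | nil => exact absurd htr (pvTokens_ne_nil rest)
          | cons t ts =>
              simp [pvTokens, htr, pvModHead, pvF, hlen, pvLast_cons_cons,
                List.dropLast_cons₂]
      · simp only [pvAStep]
        rw [if_neg hc]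
        rw [ih full row (word ++ [c])]
        simp only [pvTokens, if_neg hc]
        cases htr : pvTokens rest with
        | nil => exact absurd htr (pvTokens_ne_nil rest)
        | cons t ts => simp [pvModHead]

-- completed lines flattened the way A accumulates them: each followed by '\n'
def pvFlat (lines : List (List Char)) : List Char :=
  (lines.map (· ++ ['\n'])).flatten

theorem pvFlat_append (lines : List (List Char)) (r : List Char) :
    pvFlat (lines ++ [r]) = pvFlat lines ++ r ++ ['\n'] := by
  simp [pvFlat]

-- pvF is B's fold with full_string = flattened lines
theorem pv_F_eq_Bfold (ws : List (List Char)) :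
    ∀ (lines : List (List Char)) (row : List Char),
      pvF (pvFlat lines, row) ws =
        (let st := ws.foldl pvBStep (lines, row)
         (pvFlat st.1, st.2)) := by
  induction ws with
  | nil => intro lines row; simp [pvF]
  | cons w ws ih =>
      intro lines row
      simp only [pvF, List.foldl_cons, pvBStep]
      by_cases hlen : (row.length : Int) + (w.length : Int) + 1 ≥ 72
      · rw [if_pos hlen, if_pos hlen, ← pvFlat_append, ih]
      · rw [if_neg hlen, if_neg hlen, ih]

-- "\n".join(lines ++ [last]) = flattened lines ++ last
theorem pv_join_eq (lines : List (List Char)) (last : List Char) :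
    PySem.Chars.join ['\n'] (lines ++ [last]) = pvFlat lines ++ last := by
  induction lines with
  | nil => simp [PySem.Chars.join_singleton, pvFlat]
  | cons l ls ih =>
      cases ls with
      | nil =>
          rw [List.cons_append, List.nil_append, PySem.Chars.join_cons_cons]
          simp [PySem.Chars.join_singleton, pvFlat]
      | cons l' ls' =>
          simp only [List.cons_append] at ih ⊢
          rw [PySem.Chars.join_cons_cons, ih]
          simp [pvFlat]

theorem pvLast_eq_getLast (t : List Char) (ts : List (List Char)) :
    pvLast (t :: ts) = (t :: ts).getLast (by simp) := by
  induction ts generalizing t with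
  | nil => rfl
  | cons b ts ih =>
      rw [pvLast_cons_cons]
      exact (ih b).trans (List.getLast_cons (by simp)).symm

-- ===== VERDICT (by name: the statement is the Claim_ definition above) =====
theorem shop_docstring_py_spec : Claim_equal_shop_docstring_py := by
  intro docstring _
  unfold Spec_shop_docstring_py
  simp only [shop_docstring_py, shop_docstring_py_alt]
  rw [PySem.List.slice_from _ (by norm_num), pv_splitOn_space, PySem.List.slice_to_neg_one]
  rw [pv_Aloop_eq docstring.toList [] [] []]
  cases htr : pvTokens docstring.toList with
  | nil => exact absurd htr (pvTokens_ne_nil docstring.toList)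
  | cons t ts =>
      simp only [pvModHead, List.nil_append]
      have hB := pv_F_eq_Bfold (t :: ts).dropLast [] []
      simp only [pvFlat, List.map_nil, List.flatten_nil] at hB
      rw [hB, PySem.List.pyGetD_neg_one _ _ (by simp), pv_join_eq, pvLast_eq_getLast]
      simp [pvFlat]
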